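-- pv_equiv track=rewrite | github.com/kcaze/Math-480 | catalan.py | contains_perm_231
-- ===== SOURCE A (Python) =====
-- def contains_perm_231(perm):
--   """
--   Returns True if the given permutation contains the pattern 2-3-1, False otherwise.
--
--   Parameters:
--     perm (list): A list representing a permutation.
--
--   Returns:
--     bool: True if the permutation contains the pattern 2-3-1, False otherwise.
--   """
--   n = len(perm)
--
--   if n < 3:
--     return False
--
--   for i in range(n - 2):
--     for j in range(i + 1, n - 1):
--       for k in range(j + 1, n):
--         if perm[i] < perm[j] and perm[k] < perm[i] and perm[k] < perm[j]:
--           return True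
--
--   return False
-- ===== SOURCE B (Python) =====
-- def contains_perm_231(perm):
--   """
--   Returns True if the given permutation contains the pattern 2-3-1, False otherwise.
--   One backward pass over j keeping the running minimum m of the suffix after j:
--   a 231 pattern exists iff some i < j has m < perm[i] < perm[j].
--   """
--   m = None
--   for j in range(len(perm) - 1, 0, -1):
--     if m is not None:
--       for i in range(j):
--         if m < perm[i] < perm[j]:
--           return True
--     m = perm[j] if m is None or perm[j] < m else m
--   return False
-- ===== Notes on version B (the rewrite author's own statement) =====
-- stated objective: faster
-- what changed: Replaced the triple nested index scan by a single backward pass that carries the running minimum of the suffix, so the innermost k-loop disappears: a 231 pattern exists iff some i < j has suffix-min(j) < perm[i] < perm[j].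
import Mathlib
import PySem

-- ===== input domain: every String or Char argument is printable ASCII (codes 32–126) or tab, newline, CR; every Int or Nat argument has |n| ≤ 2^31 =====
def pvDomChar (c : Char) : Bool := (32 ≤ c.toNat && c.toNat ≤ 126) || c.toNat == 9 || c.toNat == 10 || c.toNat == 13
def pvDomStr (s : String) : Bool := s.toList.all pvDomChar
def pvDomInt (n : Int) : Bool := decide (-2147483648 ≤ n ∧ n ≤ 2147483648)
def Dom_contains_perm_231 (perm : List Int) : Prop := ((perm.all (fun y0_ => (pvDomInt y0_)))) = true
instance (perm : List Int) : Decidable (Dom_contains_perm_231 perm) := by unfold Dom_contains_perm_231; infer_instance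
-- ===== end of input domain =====

-- B replaces A's triple nested index scan by one backward pass carrying the running
-- suffix minimum, so the innermost k-scan disappears (objective: faster).

-- ===== PORT A =====
-- A: triple nested loop over index ranges; 'return True' inside the loops ≡ List.any.
def contains_perm_231 (perm : List Int) : Bool :=
  let n : Int := perm.length
  if n < 3 then false
  else
    (PySem.List.pyRange 0 (n - 2) 1).any fun i =>
      (PySem.List.pyRange (i + 1) (n - 1) 1).any fun j =>
        (PySem.List.pyRange (j + 1) n 1).any fun k =>
          decide (PySem.List.pyGetD perm i 0 < PySem.List.pyGetD perm j 0) &&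
          decide (PySem.List.pyGetD perm k 0 < PySem.List.pyGetD perm i 0) &&
          decide (PySem.List.pyGetD perm k 0 < PySem.List.pyGetD perm j 0)


-- ===== PORT B =====
-- B's backward loop over j = n-1, …, 1 (range(n-1, 0, -1)) with state m = running
-- suffix minimum (None before the first step); 'return True' ≡ stopping with true.
def pvAltLoop (perm : List Int) : List Int → Option Int → Bool
  | [], _ => false
  | j :: js, m =>
    let pj := PySem.List.pyGetD perm j 0
    if (match m with
        | some mv =>
          (PySem.List.pyRange 0 j 1).any fun i =>
            decide (mv < PySem.List.pyGetD perm i 0) &&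
            decide (PySem.List.pyGetD perm i 0 < pj)
        | none => false)
    then true
    else pvAltLoop perm js (some (match m with
        | none => pj
        | some mv => if pj < mv then pj else mv))

def contains_perm_231_alt (perm : List Int) : Bool :=
  pvAltLoop perm (PySem.List.pyRange ((perm.length : Int) - 1) 0 (-1)) none


-- ===== PRECONDITION & SPEC =====
def Spec_contains_perm_231 (perm : List Int) (out : Bool) : Prop := out = contains_perm_231_alt perm
instance (perm : List Int) (out : Bool) : Decidable (Spec_contains_perm_231 perm out) := by unfold Spec_contains_perm_231; infer_instance

-- ===== CLAIM (what is proved, stated in full; the proofs are below) =====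
def Claim_equal_contains_perm_231 : Prop := ∀ (perm : List Int), Dom_contains_perm_231 perm → Spec_contains_perm_231 perm (contains_perm_231 perm)

-- ===== LEMMAS AND PROOFS =====

-- The 231 pattern (indices i < j < k with perm[k] < perm[i] < perm[j]), over Nat indices.
def pvPat (perm : List Int) : Prop :=
  ∃ i j k : Nat, i < j ∧ j < k ∧ k < perm.length ∧
    perm.getD i 0 < perm.getD j 0 ∧ perm.getD k 0 < perm.getD i 0


-- A returns true exactly on inputs containing a 231 pattern.
lemma pvA_iff (perm : List Int) : contains_perm_231 perm = true ↔ pvPat perm := by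
  unfold pvPat
  simp only [contains_perm_231]
  split
  · rename_i h
    simp only [Bool.false_eq_true, false_iff]
    rintro ⟨i, j, k, hij, hjk, hk, -⟩
    omega
  · rename_i h
    simp only [List.any_eq_true, PySem.List.mem_pyRange_one, Bool.and_eq_true, decide_eq_true_eq]
    constructor
    · rintro ⟨i, ⟨hi0, hi⟩, j, ⟨hj0, hj⟩, k, ⟨hk0, hk⟩, ⟨c1, c2⟩, -⟩
      refine ⟨i.toNat, j.toNat, k.toNat, by omega, by omega, by omega, ?_, ?_⟩
      · rwa [PySem.List.pyGetD_of_nonneg _ _ (by omega), PySem.List.pyGetD_of_nonneg _ _ (by omega)] at c1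
      · rwa [PySem.List.pyGetD_of_nonneg _ _ (by omega), PySem.List.pyGetD_of_nonneg _ _ (by omega)] at c2
    · rintro ⟨i, j, k, hij, hjk, hk, c1, c2⟩
      refine ⟨(i : Int), ⟨by omega, by omega⟩, (j : Int), ⟨by omega, by omega⟩,
              (k : Int), ⟨by omega, by omega⟩, ⟨?_, ?_⟩, ?_⟩
      all_goals
        simp only [PySem.List.pyGetD_natCast]
        omega


-- min of the suffix strictly after index t is below x iff some later entry is below x
lemma pvSminLt (perm : List Int) (t : Nat) (x : Int) :
    (∃ mv, (perm.drop (t+1)).min? = some mv ∧ mv < x) ↔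
    ∃ k : Nat, t < k ∧ k < perm.length ∧ perm.getD k 0 < x := by
  constructor
  · rintro ⟨mv, hm, hlt⟩
    have hmem := List.min?_mem hm
    obtain ⟨i, hi, he⟩ := List.mem_iff_getElem.mp hmem
    refine ⟨t + 1 + i, by omega, by simp at hi; omega, ?_⟩
    rw [List.getD_eq_getElem _ _ (by simp at hi; omega)]
    rw [List.getElem_drop] at he
    omega
  · rintro ⟨k, h1, h2, h3⟩
    have hk' : k - (t+1) < (perm.drop (t+1)).length := by simp; omega
    have hy : perm.getD k 0 ∈ perm.drop (t+1) := by
      rw [List.getD_eq_getElem _ _ h2]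
      have : perm[k] = (perm.drop (t+1))[k - (t+1)] := by
        rw [List.getElem_drop]; congr 1; omega
      rw [this]
      exact List.getElem_mem _
    cases hmo : (perm.drop (t+1)).min? with
    | none => rw [List.min?_eq_none_iff] at hmo; rw [hmo] at hy; simp at hy
    | some mv =>
      refine ⟨mv, rfl, ?_⟩
      have := List.min?_eq_some_iff.mp hmo
      exact lt_of_le_of_lt (this.2 _ hy) h3

-- main loop invariant
lemma pvLoopIff (perm : List Int) (t : Nat) (ht : t < perm.length) :
    pvAltLoop perm (PySem.List.pyRange (t : Int) 0 (-1)) ((perm.drop (t+1)).min?) = true ↔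
    ∃ i j k : Nat, i < j ∧ j ≤ t ∧ j < k ∧ k < perm.length ∧
      perm.getD i 0 < perm.getD j 0 ∧ perm.getD k 0 < perm.getD i 0 := by
  induction t with
  | zero =>
    rw [PySem.List.pyRange_neg_one_eq_nil (by omega)]
    simp only [pvAltLoop, Bool.false_eq_true, false_iff]
    rintro ⟨i, j, k, hij, hj, -⟩; omega
  | succ t ih =>
    have hstep : ((t+1 : Nat) : Int) - 1 = (t : Int) := by push_cast; ring
    rw [PySem.List.pyRange_neg_one_cons (by omega : (0:Int) < ((t+1 : Nat) : Int))]
    simp only [pvAltLoop, hstep]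
    have htrig : ((match (perm.drop (t+1+1)).min? with
        | some mv =>
          (PySem.List.pyRange 0 ((t+1 : Nat) : Int) 1).any fun i =>
            decide (mv < PySem.List.pyGetD perm i 0) &&
            decide (PySem.List.pyGetD perm i 0 < PySem.List.pyGetD perm ((t+1 : Nat) : Int) 0)
        | none => false) = true) ↔
        (∃ i k : Nat, i < t+1 ∧ t+1 < k ∧ k < perm.length ∧
          perm.getD i 0 < perm.getD (t+1) 0 ∧ perm.getD k 0 < perm.getD i 0) := by
      cases hmo : (perm.drop (t+1+1)).min? with
      | none =>
        simp only [Bool.false_eq_true, false_iff]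
        rintro ⟨i, k, hi, hk1, hk2, -, hki⟩
        have hex := (pvSminLt perm (t+1) (perm.getD i 0)).mpr ⟨k, hk1, hk2, hki⟩
        rw [hmo] at hex
        obtain ⟨mv, hmv, -⟩ := hex
        simp at hmv
      | some mv =>
        simp only [List.any_eq_true, PySem.List.mem_pyRange_one, Bool.and_eq_true,
          decide_eq_true_eq, PySem.List.pyGetD_natCast]
        constructor
        · rintro ⟨i, ⟨hi0, hi⟩, c1, c2⟩
          rw [PySem.List.pyGetD_of_nonneg _ _ (by omega)] at c1 c2
          obtain ⟨k, hk1, hk2, hk3⟩ := (pvSminLt perm (t+1) (perm.getD i.toNat 0)).mp ⟨mv, hmo, c1⟩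
          exact ⟨i.toNat, k, by omega, hk1, hk2, c2, hk3⟩
        · rintro ⟨i, k, hi, hk1, hk2, c1, c2⟩
          obtain ⟨mv', hmv', hlt⟩ := (pvSminLt perm (t+1) (perm.getD i 0)).mpr ⟨k, hk1, hk2, c2⟩
          rw [hmo] at hmv'
          injection hmv' with hh
          subst hh
          exact ⟨(i : Int), ⟨by omega, by omega⟩, by simpa using hlt, by simpa using c1⟩
    by_cases hY : (∃ i k : Nat, i < t+1 ∧ t+1 < k ∧ k < perm.length ∧
          perm.getD i 0 < perm.getD (t+1) 0 ∧ perm.getD k 0 < perm.getD i 0)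
    · rw [if_pos (htrig.mpr hY)]
      obtain ⟨i, k, hi, hk1, hk2, c1, c2⟩ := hY
      exact iff_of_true rfl ⟨i, t+1, k, by omega, le_refl _, by omega, hk2, c1, c2⟩
    · rw [if_neg (fun hx => hY (htrig.mp hx))]
      have hpg : PySem.List.pyGetD perm ((t+1:Nat) : Int) 0 = perm.getD (t+1) 0 := by
        rw [PySem.List.pyGetD_of_nonneg _ _ (by omega)]
        congr 1
      have hupd : (some (match (perm.drop (t+1+1)).min? with
          | none => PySem.List.pyGetD perm ((t+1:Nat) : Int) 0
          | some mv => if PySem.List.pyGetD perm ((t+1:Nat) : Int) 0 < mv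
                       then PySem.List.pyGetD perm ((t+1:Nat) : Int) 0 else mv)
          : Option Int) = (perm.drop (t+1)).min? := by
        have hd : perm.drop (t+1) = perm[t+1] :: perm.drop (t+1+1) := List.drop_eq_getElem_cons ht
        rw [hd, List.min?_cons, hpg, List.getD_eq_getElem _ _ ht]
        cases hmo : (perm.drop (t+1+1)).min? with
        | none => simp
        | some mv =>
          simp only [Option.elim]
          congr 1
          rw [min_def]
          split_ifs <;> omega
      rw [hupd, ih (by omega)]
      constructor
      · rintro ⟨i, j, k, h1, h2, h3, h4, h5, h6⟩
        exact ⟨i, j, k, h1, by omega, h3, h4, h5, h6⟩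
      · rintro ⟨i, j, k, h1, h2, h3, h4, h5, h6⟩
        rcases Nat.lt_or_ge j (t+1) with hj | hj
        · exact ⟨i, j, k, h1, by omega, h3, h4, h5, h6⟩
        · exfalso
          have hj' : j = t+1 := by omega
          subst hj'
          exact hY ⟨i, k, h1, h3, h4, h5, h6⟩

lemma pvB_iff (perm : List Int) : contains_perm_231_alt perm = true ↔ pvPat perm := by
  unfold contains_perm_231_alt pvPat
  cases hl : perm.length with
  | zero =>
    rw [show (((0:Nat):Int) - 1) = -1 by simp, PySem.List.pyRange_neg_one_eq_nil (by omega)]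
    simp only [pvAltLoop, Bool.false_eq_true, false_iff]
    rintro ⟨i, j, k, -, -, hk, -⟩; omega
  | succ l =>
    have hstep : (((l+1:Nat)):Int) - 1 = ((l:Nat) : Int) := by push_cast; ring
    have h2 : (perm.drop (l+1)).min? = none := by
      rw [List.min?_eq_none_iff, List.drop_eq_nil_iff]; omega
    rw [hstep, ← h2, pvLoopIff perm l (by omega)]
    constructor
    · rintro ⟨i, j, k, hij, hjl, hjk, hk, c1, c2⟩
      exact ⟨i, j, k, hij, hjk, by omega, c1, c2⟩
    · rintro ⟨i, j, k, hij, hjk, hk, c1, c2⟩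
      exact ⟨i, j, k, hij, by omega, hjk, by omega, c1, c2⟩

-- ===== VERDICT (by name: the statement is the Claim_ definition above) =====
theorem contains_perm_231_spec : Claim_equal_contains_perm_231 := by
  intro perm _
  unfold Spec_contains_perm_231
  rw [Bool.eq_iff_iff, pvA_iff, pvB_iff]
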